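-- pv_equiv track=rewrite | github.com/latticetower/htrec-2022 | src/greedy.py | split_to_fragments
-- ===== SOURCE A (Python) =====
-- def split_to_fragments(words):
--     buf = []
--     for w, s, is_known in words:
--         if is_known:
--             if len(buf) > 0:
--                 yield buf, False
--                 buf = []
--             yield [(w, s)], True
--         else:
--             buf.append((w, s))
--     if len(buf) > 0:
--         yield buf, False
-- ===== SOURCE B (Python) =====
-- def split_to_fragments(words):
--     # Group-first traversal: find each maximal run of equal is_known with an
--     # index scan, then emit the whole run at once.
--     words = list(words)
--     n = len(words)
--     i = 0
--     while i < n: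
--         k = words[i][2]
--         j = i
--         while j < n and words[j][2] == k:
--             j += 1
--         if k:
--             for w, s, _ in words[i:j]:
--                 yield [(w, s)], True
--         else:
--             yield [(w, s) for w, s, _ in words[i:j]], False
--         i = j
-- ===== Notes on version B (the rewrite author's own statement) =====
-- stated objective: alternative
-- what changed: Replaces A's element-by-element loop with a mutable pending buffer and flush logic by a group-first traversal: an index scan finds each maximal run of equal is_known flags and the whole run is emitted at once.
import Mathlib
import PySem

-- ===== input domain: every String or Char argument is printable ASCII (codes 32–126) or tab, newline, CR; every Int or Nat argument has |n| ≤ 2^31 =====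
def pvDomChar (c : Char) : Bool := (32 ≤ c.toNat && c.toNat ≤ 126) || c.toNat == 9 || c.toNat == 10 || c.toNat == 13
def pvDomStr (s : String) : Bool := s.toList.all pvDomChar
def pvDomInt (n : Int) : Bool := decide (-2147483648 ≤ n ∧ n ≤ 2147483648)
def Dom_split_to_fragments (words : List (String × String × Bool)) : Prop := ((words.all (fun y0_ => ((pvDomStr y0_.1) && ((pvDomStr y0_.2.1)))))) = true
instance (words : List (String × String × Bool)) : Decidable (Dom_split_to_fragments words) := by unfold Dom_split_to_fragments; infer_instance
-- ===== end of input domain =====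

-- ===== PORT A =====
-- Header: B replaces A's pending-buffer/flush loop by a group-first run scan (alternative
-- decomposition, same cost); equivalence of RETURN values (both generators fully consumed).
-- goA transliterates A's loop: buf is the pending-unknown buffer, flushed before a known word and at the end.
def goA (buf : List (String × String)) : List (String × String × Bool) → List ((List (String × String)) × Bool)
  | [] => if buf.isEmpty then [] else [(buf, false)]
  | (w, s, is_known) :: rest =>
      if is_known then
        (if buf.isEmpty then [] else [(buf, false)]) ++ ([(w, s)], true) :: goA [] rest
      else
        goA (buf ++ [(w, s)]) rest

def split_to_fragments (words : List (String × String × Bool)) : List ((List (String × String)) × Bool) :=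
  goA [] words

-- ===== PORT B =====
-- grpB transliterates B's outer while loop: each step isolates the maximal run of words
-- sharing the head's is_known flag (the inner index scan) and emits it at once.
def grpB : List (String × String × Bool) → List ((List (String × String)) × Bool)
  | [] => []
  | x :: xs =>
      let g := xs.takeWhile (fun t => t.2.2 == x.2.2)
      let rest := xs.dropWhile (fun t => t.2.2 == x.2.2)
      if x.2.2 then
        ((x :: g).map (fun t => ([(t.1, t.2.1)], true))) ++ grpB rest
      else
        ((x :: g).map (fun t => (t.1, t.2.1)), false) :: grpB rest
  termination_by l => l.length
  decreasing_by
    all_goals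
      simp only [List.length_cons]
      exact Nat.lt_succ_of_le (List.length_dropWhile_le _ _)

def split_to_fragments_alt (words : List (String × String × Bool)) : List ((List (String × String)) × Bool) :=
  grpB words

-- ===== PRECONDITION & SPEC =====
def Spec_split_to_fragments (words : List (String × String × Bool)) (out : List ((List (String × String)) × Bool)) : Prop := out = split_to_fragments_alt words
instance (words : List (String × String × Bool)) (out : List ((List (String × String)) × Bool)) : Decidable (Spec_split_to_fragments words out) := by unfold Spec_split_to_fragments; infer_instance

-- ===== CLAIM (what is proved, stated in full; the proofs are below) =====
def Claim_equal_split_to_fragments : Prop := ∀ (words : List (String × String × Bool)), Dom_split_to_fragments words → Spec_split_to_fragments words (split_to_fragments words)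

-- ===== LEMMAS AND PROOFS =====

-- lift a pending buffer back into unknown-flagged words
def liftBuf (buf : List (String × String)) : List (String × String × Bool) :=
  buf.map (fun p => (p.1, p.2, false))

lemma takeWhile_dropWhile_all {T : Type} (p : T → Bool) :
    ∀ (g rest : List T), (∀ x ∈ g, p x = true) →
    (∀ y, rest.head? = some y → p y = false) →
    (g ++ rest).takeWhile p = g ∧ (g ++ rest).dropWhile p = rest := by
  intro g
  induction g with
  | nil =>
    intro rest _ hr
    cases rest with
    | nil => simp
    | cons y ys =>
      have := hr y (by simp)
      constructor
      · simp [this]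
      · simp [this]
  | cons a g ih =>
    intro rest hg hr
    have ha : p a = true := hg a (by simp)
    have ⟨h1, h2⟩ := ih rest (fun x hx => hg x (by simp [hx])) hr
    constructor
    · simp [ha, h1]
    · simp [ha, h2]

lemma head_dropWhile_false {T : Type} (p : T → Bool) (l : List T) (y : T)
    (hy : (l.dropWhile p).head? = some y) : p y = false := by
  have h := List.head?_dropWhile_not (p := p) (l := l)
  rw [hy] at h
  simpa using h

lemma grpB_run : ∀ (g rest : List (String × String × Bool)),
    (∀ x ∈ g, x.2.2 = true) →
    (∀ y, rest.head? = some y → y.2.2 = false) →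
    grpB (g ++ rest) = g.map (fun t => ([(t.1, t.2.1)], true)) ++ grpB rest := by
  intro g rest hg hr
  cases g with
  | nil => simp
  | cons x xs =>
    obtain ⟨a, c, k⟩ := x
    have hk : k = true := hg (a, c, k) (by simp)
    subst hk
    have ⟨h1, h2⟩ := takeWhile_dropWhile_all (fun t => t.2.2 == true) xs rest
      (fun y hy => by simp [hg y (by simp [hy])])
      (fun y hy => by simp [hr y hy])
    rw [List.cons_append]
    simp only [grpB]
    rw [if_true, h1, h2]

lemma grpB_true_cons (w s : String) (rest : List (String × String × Bool)) :
    grpB ((w, s, true) :: rest) = ([(w, s)], true) :: grpB rest := by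
  have hsplit := List.takeWhile_append_dropWhile (p := fun t : String × String × Bool => t.2.2 == true) (l := rest)
  have hg : ∀ x ∈ rest.takeWhile (fun t : String × String × Bool => t.2.2 == true), x.2.2 = true := by
    intro x hx
    simpa using List.mem_takeWhile_imp hx
  have hr : ∀ y, (rest.dropWhile (fun t : String × String × Bool => t.2.2 == true)).head? = some y → y.2.2 = false := by
    intro y hy
    simpa using head_dropWhile_false _ rest y hy
  have hrest : grpB rest =
      (rest.takeWhile (fun t : String × String × Bool => t.2.2 == true)).map (fun t => ([(t.1, t.2.1)], true))
      ++ grpB (rest.dropWhile (fun t : String × String × Bool => t.2.2 == true)) := by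
    conv_lhs => rw [← hsplit]
    exact grpB_run _ _ hg hr
  simp only [grpB]
  rw [if_true]
  simp [hrest]

lemma grpB_liftBuf_append (buf : List (String × String)) :
    ∀ (rest : List (String × String × Bool)),
    (∀ y, rest.head? = some y → y.2.2 = true) →
    grpB (liftBuf buf ++ rest) =
      (if buf.isEmpty then [] else [(buf, false)]) ++ grpB rest := by
  intro rest hr
  cases buf with
  | nil => simp [liftBuf]
  | cons b bs =>
    have hg : ∀ x ∈ liftBuf bs, x.2.2 = false := by
      intro x hx
      obtain ⟨p, _, rfl⟩ := List.mem_map.1 hx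
      rfl
    have ⟨h1, h2⟩ := takeWhile_dropWhile_all (fun t : String × String × Bool => t.2.2 == false) (liftBuf bs) rest
      (fun y hy => by simp [hg y hy]) (fun y hy => by simp [hr y hy])
    rw [show liftBuf (b :: bs) = (b.1, b.2, false) :: liftBuf bs from rfl,
        List.cons_append]
    simp only [grpB]
    rw [if_neg Bool.false_ne_true, h1, h2]
    simp only [List.isEmpty_cons, Bool.false_eq_true]
    congr 2
    rw [show ((b.1, b.2, false) :: liftBuf bs) = liftBuf (b :: bs) from rfl]
    simp only [liftBuf, List.map_map]
    exact List.map_id'' (fun p => rfl) _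

lemma goA_eq_grpB : ∀ (words : List (String × String × Bool)) (buf : List (String × String)),
    goA buf words = grpB (liftBuf buf ++ words) := by
  intro words
  induction words with
  | nil =>
    intro buf
    rw [goA, grpB_liftBuf_append buf [] (fun y hy => by simp at hy)]
    simp [grpB]
  | cons x rest ih =>
    intro buf
    obtain ⟨w, s, k⟩ := x
    cases k with
    | false =>
      rw [goA]
      simp only [if_neg (by simp : ¬ (false = true))]
      rw [ih (buf ++ [(w, s)])]
      congr 1
      simp [liftBuf]
    | true =>
      rw [goA]
      rw [ih [], grpB_liftBuf_append buf ((w, s, true) :: rest)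
        (fun y hy => by simp at hy; rw [← hy])]
      rw [grpB_true_cons]
      simp [liftBuf]

-- ===== VERDICT (by name: the statement is the Claim_ definition above) =====
theorem split_to_fragments_spec : Claim_equal_split_to_fragments := by
  intro words _
  unfold Spec_split_to_fragments split_to_fragments split_to_fragments_alt
  simpa [liftBuf] using goA_eq_grpB words []
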